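-- pv_equiv track=rewrite | github.com/dzimislaff/rtvslo | rtvslo/rtv.py | odstrani_znake
-- ===== SOURCE A (Python) =====
-- def odstrani_znake(beseda: str,
--                    nedovoljeni_znaki: list
--                    ) -> str:
--     """
--     odstrani nedovoljene znake iz niza znakov
--     """
--     try:
--         assert isinstance(beseda, str)
--     except AssertionError:
--         return  # TODO logging
--
--     beseda = beseda.replace(" ", "-")
--     nedovoljeni_znaki.append(",")
--     for i in nedovoljeni_znaki:
--         beseda = beseda.replace(i, "").replace("–", "-")
--     while "--" in beseda:
--         beseda = beseda.replace("--", "-")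
--     beseda = beseda.lstrip("-").rstrip("-")
--     return beseda
-- ===== SOURCE B (Python) =====
-- def odstrani_znake(beseda: str,
--                    nedovoljeni_znaki: list
--                    ) -> str:
--     """
--     odstrani nedovoljene znake iz niza znakov
--     """
--     if not isinstance(beseda, str):
--         return  # TODO logging
--
--     nedovoljeni_znaki.append(",")
--     s = beseda.replace(" ", "-")
--     for znak in nedovoljeni_znaki:
--         s = s.replace(znak, "")
--     # single pass: collapse dash runs and trim both ends
--     out = []
--     pending = False
--     for c in s:
--         if c == "-":
--             pending = True
--         else:
--             if pending and out:
--                 out.append("-")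
--             pending = False
--             out.append(c)
--     return "".join(out)
-- ===== Notes on version B (the rewrite author's own statement) =====
-- stated objective: alternative
-- what changed: A's fixpoint loop `while '--' in s: s = s.replace('--','-')` followed by lstrip('-')/rstrip('-') is replaced by a single left-to-right pass with a pending-dash flag that collapses dash runs and trims both ends in one traversal; the per-item removal loop keeps only the replace(i,'') step (the en-dash substitution is a no-op on the ASCII domain).
import Mathlib
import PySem

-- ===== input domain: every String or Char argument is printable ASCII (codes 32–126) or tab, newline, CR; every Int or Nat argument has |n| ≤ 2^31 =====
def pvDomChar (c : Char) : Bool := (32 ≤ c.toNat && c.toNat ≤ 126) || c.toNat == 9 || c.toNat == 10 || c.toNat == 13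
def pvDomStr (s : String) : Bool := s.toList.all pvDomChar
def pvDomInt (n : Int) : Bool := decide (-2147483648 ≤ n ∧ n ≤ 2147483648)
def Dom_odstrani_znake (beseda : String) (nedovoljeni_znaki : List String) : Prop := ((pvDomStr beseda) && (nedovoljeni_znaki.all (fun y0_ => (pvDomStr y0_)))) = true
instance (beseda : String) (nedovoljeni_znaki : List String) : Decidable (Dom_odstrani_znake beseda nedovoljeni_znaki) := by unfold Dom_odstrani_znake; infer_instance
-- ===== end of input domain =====

-- B replaces A's fixpoint `while "--" in s` collapse plus lstrip/rstrip by a single left-to-right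
-- pass with a pending-dash flag; equivalence is claimed on the ASCII domain Dom_ (return value only;
-- both A and B append "," to the caller's list — the same observable mutation).

-- ===== PORT A =====
-- Fuel-free description of Python's str.replace (old ≠ []); needed only so that the
-- termination lemma `collapse_lt` for A's `while "--" in beseda` loop can be stated and
-- proved before `collapseA` cites it in its `decreasing_by`.
def replF (old new : List Char) (l : List Char) : List Char :=
  if h : old.isPrefixOf l ∧ old ≠ [] then new ++ replF old new (l.drop old.length)
  else match l with
    | [] => []
    | c :: t => c :: replF old new t
termination_by l.length
decreasing_by
  · have h1 := (List.isPrefixOf_iff_prefix.mp h.1).length_le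
    have h2 : 0 < old.length := List.length_pos_iff.mpr h.2
    simp; omega
  · simp

theorem go_spec (old new : List Char) (hold : old ≠ []) :
    ∀ (fuel : Nat) (l acc : List Char), l.length ≤ fuel →
      PySem.Chars.replace.go old new fuel l acc = acc.reverse ++ replF old new l := by
  intro fuel
  induction fuel with
  | zero =>
    intro l acc hl
    have : l = [] := by cases l <;> simp_all
    subst this
    rw [PySem.Chars.replace.go, replF]
    simp [List.isPrefixOf_iff_prefix, hold]
  | succ n ih =>
    intro l acc hl
    cases l with
    | nil =>
      rw [PySem.Chars.replace.go, replF]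
      simp [List.isPrefixOf_iff_prefix, hold]
      omega
    | cons c t =>
      rw [PySem.Chars.replace.go, replF]
      by_cases hp : old.isPrefixOf (c :: t)
      · have h1 := (List.isPrefixOf_iff_prefix.mp hp).length_le
        have h2 : 0 < old.length := List.length_pos_iff.mpr hold
        have hb : ((c :: t).drop old.length).length ≤ n := by
          simp only [List.length_drop, List.length_cons]
          simp only [List.length_cons] at hl; omega
        rw [dif_pos ⟨hp, hold⟩]
        simp only [hp, if_true]
        rw [ih ((c :: t).drop old.length) (new.reverse ++ acc) hb]
        simp
      · have hcond : ¬ (old.isPrefixOf (c :: t) = true ∧ old ≠ []) := by simp [hp]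
        rw [dif_neg hcond]
        simp only [hp, if_false]
        rw [ih t (c :: acc) (by simp only [List.length_cons] at hl; omega)]
        simp

theorem replace_eq_replF (old new l : List Char) (hold : old ≠ []) :
    PySem.Chars.replace l old new = replF old new l := by
  rw [PySem.Chars.replace]
  simp only [List.isEmpty_iff, hold, if_neg]
  exact go_spec old new hold l.length l [] le_rfl

-- what one pass of .replace("--", "-") computes
def repl2 : List Char → List Char
  | '-' :: '-' :: t => '-' :: repl2 t
  | c :: t => c :: repl2 t
  | [] => []

theorem replF_dd (l : List Char) : replF ['-', '-'] ['-'] l = repl2 l := by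
  fun_induction repl2 l with
  | case1 t ih =>
    rw [replF]
    rw [dif_pos ⟨by simp [List.isPrefixOf], by simp⟩]
    simpa using ih
  | case2 c t h ih =>
    rw [replF]
    have hp : ¬ (List.isPrefixOf ['-', '-'] (c :: t) = true ∧ (['-', '-'] : List Char) ≠ []) := by
      rintro ⟨hpre, -⟩
      rw [List.isPrefixOf_iff_prefix] at hpre
      rcases hpre with ⟨r, hr⟩
      have hct : c = '-' ∧ t = '-' :: r := by simpa using hr.symm
      exact h r hct.1 hct.2
    rw [dif_neg hp]
    simpa using ih
  | case3 => rw [replF]; simp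

theorem repl2_length_lt (l : List Char) (h : ['-', '-'] <:+: l) :
    (repl2 l).length < l.length := by
  have le : ∀ m : List Char, (repl2 m).length ≤ m.length := by
    intro m
    fun_induction repl2 m <;> simp_all <;> omega
  fun_induction repl2 l with
  | case1 t ih => have := le t; simp; omega
  | case2 c t hne ih =>
    rcases List.infix_cons_iff.mp h with hpre | hinf
    · rcases hpre with ⟨r, hr⟩
      have hct : c = '-' ∧ t = '-' :: r := by simpa using hr.symm
      exact absurd hct.2 (fun h2 => hne r hct.1 h2)
    · have := ih hinf; simp; omega
  | case3 => simp at h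

theorem collapse_lt (s : List Char) (h : PySem.Chars.isIn ['-', '-'] s = true) :
    (PySem.Chars.replace s ['-', '-'] ['-']).length < s.length := by
  rw [replace_eq_replF _ _ _ (by simp), replF_dd]
  exact repl2_length_lt s ((PySem.Chars.isIn_iff_infix _ _).mp h)

-- while "--" in beseda: beseda = beseda.replace("--", "-")
def collapseA (s : List Char) : List Char :=
  if h : PySem.Chars.isIn ['-', '-'] s = true then
    collapseA (PySem.Chars.replace s ['-', '-'] ['-'])
  else s
termination_by s.length
decreasing_by exact collapse_lt s h

-- one iteration of A's removal loop: beseda.replace(i, "").replace("–", "-")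
def stepA (s : List Char) (i : String) : List Char :=
  PySem.Chars.replace (PySem.Chars.replace s i.toList []) ['–'] ['-']

def lstripDash (s : List Char) : List Char := s.dropWhile (fun c => ['-'].contains c)  -- .lstrip("-")
def rstripDash (s : List Char) : List Char := (s.reverse.dropWhile (fun c => ['-'].contains c)).reverse  -- .rstrip("-")

def odstrani_znake (beseda : String) (nedovoljeni_znaki : List String) : String :=
  -- `assert isinstance(beseda, str)` always succeeds: beseda : String
  String.mk (rstripDash (lstripDash (collapseA
    ((nedovoljeni_znaki ++ [","]).foldl stepA                    -- nedovoljeni_znaki.append(","); for i in …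
      (PySem.Chars.replace beseda.toList [' '] ['-'])))))        -- beseda.replace(" ", "-")

-- ===== PORT B =====
-- one iteration of B's removal loop: s.replace(znak, "")
def stepB (s : List Char) (i : String) : List Char :=
  PySem.Chars.replace s i.toList []

-- body of B's `for c in s` scan: state = (out, pending)
def scanStep (st : List Char × Bool) (c : Char) : List Char × Bool :=
  if c = '-' then (st.1, true)
  else (st.1 ++ (if st.2 = true ∧ st.1 ≠ [] then ['-'] else []) ++ [c], false)

def odstrani_znake_alt (beseda : String) (nedovoljeni_znaki : List String) : String :=
  String.mk
    (((nedovoljeni_znaki ++ [","]).foldl stepB                    -- nedovoljeni_znaki.append(","); for znak in …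
       (PySem.Chars.replace beseda.toList [' '] ['-'])            -- beseda.replace(" ", "-")
     ).foldl scanStep ([], false)).1                              -- the single collapsing/trimming pass

-- ===== PRECONDITION & SPEC =====
def Spec_odstrani_znake (beseda : String) (nedovoljeni_znaki : List String) (out : String) : Prop := out = odstrani_znake_alt beseda nedovoljeni_znaki
instance (beseda : String) (nedovoljeni_znaki : List String) (out : String) : Decidable (Spec_odstrani_znake beseda nedovoljeni_znaki out) := by unfold Spec_odstrani_znake; infer_instance

-- ===== CLAIM (what is proved, stated in full; the proofs are below) =====
def Claim_equal_odstrani_znake : Prop := ∀ (beseda : String) (nedovoljeni_znaki : List String), Dom_odstrani_znake beseda nedovoljeni_znaki → Spec_odstrani_znake beseda nedovoljeni_znaki (odstrani_znake beseda nedovoljeni_znaki)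

-- ===== LEMMAS AND PROOFS =====

theorem mem_replF (old new l : List Char) (c : Char) (h : c ∈ replF old new l) :
    c ∈ l ∨ c ∈ new := by
  fun_induction replF old new l with
  | case1 l h' ih =>
    simp at h
    rcases h with h | h
    · exact .inr h
    · rcases ih h with h | h
      · exact .inl (List.mem_of_mem_drop h)
      · exact .inr h
  | case2 => simp at h
  | case3 a t h' ih =>
    simp at h
    rcases h with h | h
    · exact .inl (by simp [h])
    · rcases ih h with h | h
      · exact .inl (by simp [h])
      · exact .inr h

theorem endash_replF (l : List Char) (h : ∀ c ∈ l, c ≠ '–') :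
    replF ['–'] ['-'] l = l := by
  induction l with
  | nil => rw [replF]; simp
  | cons c t ih =>
    rw [replF]
    have hc : c ≠ '–' := h c (by simp)
    have hp : ¬ (List.isPrefixOf ['–'] (c :: t) = true ∧ (['–'] : List Char) ≠ []) := by
      rintro ⟨hpre, -⟩
      rcases List.isPrefixOf_iff_prefix.mp hpre with ⟨r, hr⟩
      have hct : c = '–' ∧ t = r := by simpa using hr.symm
      exact hc hct.1
    rw [dif_neg hp]
    simp [ih (fun c' hc' => h c' (by simp [hc']))]

theorem replace_nil_nil (l : List Char) : PySem.Chars.replace l [] [] = l := by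
  rw [PySem.Chars.replace]; simp

def allDom (l : List Char) : Prop := ∀ c ∈ l, pvDomChar c = true

theorem allDom_no_endash (l : List Char) (h : allDom l) : ∀ c ∈ l, c ≠ '–' := by
  intro c hc heq
  have h2 := h c hc
  rw [heq] at h2
  exact absurd h2 (by decide)

theorem allDom_stepB (s : List Char) (i : String) (h : allDom s) : allDom (stepB s i) := by
  intro c hc
  unfold stepB at hc
  by_cases hi : i.toList = []
  · rw [hi, replace_nil_nil] at hc
    exact h c hc
  · rw [replace_eq_replF _ _ _ hi] at hc
    rcases mem_replF _ _ _ _ hc with h' | h'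
    · exact h c h'
    · simp at h'

theorem stepA_eq_stepB (s : List Char) (i : String) (h : allDom s) :
    stepA s i = stepB s i := by
  unfold stepA stepB
  rw [replace_eq_replF _ _ _ (by simp)]
  exact endash_replF _ (allDom_no_endash _ (allDom_stepB s i h))

theorem fold_eq (is : List String) (s : List Char) (h : allDom s) :
    is.foldl stepA s = is.foldl stepB s ∧ allDom (is.foldl stepB s) := by
  induction is generalizing s with
  | nil => exact ⟨rfl, h⟩
  | cons i is ih =>
    have hB := allDom_stepB s i h
    have := ih (stepB s i) hB
    simpa [stepA_eq_stepB s i h] using this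

-- the scan, with explicit accumulator/flag
def SG (t out : List Char) (p : Bool) : List Char := (t.foldl scanStep (out, p)).1

theorem SG_nil (out : List Char) (p : Bool) : SG [] out p = out := rfl

theorem scanStep_dash (st : List Char × Bool) : scanStep st '-' = (st.1, true) := by
  rw [scanStep]; simp

theorem scanStep_other (st : List Char × Bool) (c : Char) (hc : c ≠ '-') :
    scanStep st c = (st.1 ++ (if st.2 = true ∧ st.1 ≠ [] then ['-'] else []) ++ [c], false) := by
  rw [scanStep]; simp [hc]

theorem SG_dash (t out : List Char) (p : Bool) : SG ('-' :: t) out p = SG t out true := by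
  unfold SG
  rw [List.foldl_cons, scanStep_dash]

theorem SG_cons (c : Char) (hc : c ≠ '-') (t out : List Char) (p : Bool) :
    SG (c :: t) out p = SG t (out ++ (if p = true ∧ out ≠ [] then ['-'] else []) ++ [c]) false := by
  unfold SG
  rw [List.foldl_cons, scanStep_other _ _ hc]

theorem SG_repl2 (l : List Char) : ∀ (out : List Char) (p : Bool), SG (repl2 l) out p = SG l out p := by
  fun_induction repl2 l with
  | case1 t ih =>
    intro out p
    rw [SG_dash, SG_dash, SG_dash, ih]
  | case2 c t h ih =>
    intro out p
    by_cases hc : c = '-'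
    · subst hc
      rw [SG_dash, SG_dash, ih]
    · rw [SG_cons c hc, SG_cons c hc, ih]
  | case3 => intro out p; rfl

def noDD (s : List Char) : Prop := ¬ (['-', '-'] <:+: s)

theorem noDD_tail (c : Char) (t : List Char) (h : noDD (c :: t)) : noDD t :=
  fun h' => h (List.infix_cons_iff.mpr (.inr h'))

theorem noDD_dash_head (t : List Char) (h : noDD ('-' :: t)) : t = [] ∨ t.head? ≠ some '-' := by
  cases t with
  | nil => exact .inl rfl
  | cons c t' =>
    right
    intro hc
    simp at hc
    subst hc
    exact h (List.infix_cons_iff.mpr (.inl ⟨t', rfl⟩))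

-- what .rstrip("-") computes, recursively
def rstr : List Char → List Char
  | [] => []
  | c :: t =>
    match rstr t with
    | [] => if c = '-' then [] else [c]
    | l => c :: l

theorem rstr_cons (c : Char) (hc : c ≠ '-') (t : List Char) : rstr (c :: t) = c :: rstr t := by
  rw [rstr]
  cases h : rstr t <;> simp [h, hc]

theorem rstr_dash (t : List Char) : rstr ('-' :: t) = if rstr t = [] then [] else '-' :: rstr t := by
  rw [rstr]
  cases h : rstr t <;> simp [h]

theorem dashPred :
    (fun c : Char => (['-'] : List Char).contains c) = (fun c : Char => (c = '-' : Bool)) := by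
  funext c
  by_cases hc : c = '-' <;> simp [hc]

theorem rstr_eq (u : List Char) :
    rstr u = (u.reverse.dropWhile (fun c : Char => (c = '-' : Bool))).reverse := by
  induction u with
  | nil => rfl
  | cons c t ih =>
    rw [List.reverse_cons, List.dropWhile_append]
    by_cases h : rstr t = []
    · have hemp : (t.reverse.dropWhile (fun c : Char => (c = '-' : Bool))).isEmpty = true := by
        rw [ih] at h
        rw [List.isEmpty_iff]
        simpa using congrArg List.reverse h
      rw [if_pos hemp]
      rw [rstr, h]
      by_cases hc : c = '-' <;> simp [hc, List.dropWhile]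
    · have hemp : ¬ (t.reverse.dropWhile (fun c : Char => (c = '-' : Bool))).isEmpty = true := by
        rw [List.isEmpty_iff]
        intro hx
        exact h (by rw [ih, hx]; rfl)
      rw [if_neg hemp]
      cases hr : rstr t with
      | nil => exact absurd hr h
      | cons a l =>
        rw [rstr, hr]
        simp [← hr, ih]

theorem rstr_ne_nil_of_head (c : Char) (hc : c ≠ '-') (t : List Char) : rstr (c :: t) ≠ [] := by
  rw [rstr_cons c hc]; simp

-- the heart of the equivalence: on a "--"-free string the scan from a nonempty accumulator
-- appends exactly the rstripped remainder
theorem SG_rstr : ∀ (n : Nat) (r out : List Char), r.length ≤ n → out ≠ [] → noDD r →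
    SG r out false = out ++ rstr r ∧
    ((r = [] ∨ r.head? ≠ some '-') →
      SG r out true = out ++ (if r = [] then [] else '-' :: rstr r)) := by
  intro n
  induction n with
  | zero =>
    intro r out hr hout hnd
    have : r = [] := by cases r <;> simp_all
    subst this
    simp [SG_nil, rstr]
  | succ n ih =>
    intro r out hr hout hnd
    cases r with
    | nil => simp [SG_nil, rstr]
    | cons c t =>
      by_cases hc : c = '-'
      · subst hc
        constructor
        · rw [SG_dash]
          have hhead := noDD_dash_head t hnd
          have ht := noDD_tail _ _ hnd
          have hlen : t.length ≤ n := by simp at hr; omega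
          rw [(ih t out hlen hout ht).2 hhead]
          rw [rstr_dash]
          congr 1
          cases t with
          | nil => simp [rstr]
          | cons a t' =>
            have ha : a ≠ '-' := by
              rcases hhead with h | h
              · simp at h
              · simpa using h
            simp [rstr_ne_nil_of_head a ha t']
        · intro hh
          rcases hh with hh | hh
          · simp at hh
          · simp at hh
      · have hlen : t.length ≤ n := by simp at hr; omega
        have ht := noDD_tail _ _ hnd
        constructor
        · rw [SG_cons c hc]
          rw [show (if (false = true ∧ out ≠ []) then (['-'] : List Char) else []) = [] from by simp]
          have := (ih t (out ++ [c]) hlen (by simp) ht).1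
          simp only [List.append_nil] at this ⊢
          rw [this]
          rw [rstr_cons c hc]
          simp
        · intro _
          rw [SG_cons c hc]
          rw [if_pos ⟨rfl, hout⟩]
          have := (ih t (out ++ ['-'] ++ [c]) hlen (by simp) ht).1
          rw [this]
          rw [if_neg (by simp), rstr_cons c hc]
          simp
  
theorem SG_empty_drop : ∀ (s : List Char) (p : Bool),
    SG s [] p = SG (s.dropWhile (fun c => ['-'].contains c)) [] false := by
  intro s
  induction s with
  | nil => intro p; rfl
  | cons c t ih =>
    intro p
    by_cases hc : c = '-'
    · subst hc
      rw [SG_dash]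
      rw [ih true]
      rw [List.dropWhile_cons_of_pos (by decide)]
    · rw [List.dropWhile_cons_of_neg (by simp [hc])]
      rw [SG_cons c hc, SG_cons c hc]
      simp

theorem dropWhile_head_not (p : Char → Bool) (s : List Char) :
    ∀ c t, s.dropWhile p = c :: t → p c = false := by
  induction s with
  | nil => intro c t h; simp at h
  | cons a s' ih =>
    intro c t h
    by_cases ha : p a
    · rw [List.dropWhile_cons_of_pos ha] at h
      exact ih c t h
    · rw [List.dropWhile_cons_of_neg ha] at h
      cases h
      simpa using ha

theorem noDD_of_suffix (s u : List Char) (h : u <:+ s) (hs : noDD s) : noDD u :=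
  fun h' => hs (h'.trans h.isInfix)

theorem SG_strip (s : List Char) (hnd : noDD s) :
    SG s [] false = rstripDash (lstripDash s) := by
  rw [SG_empty_drop s false]
  unfold lstripDash rstripDash
  set u := s.dropWhile (fun c => ['-'].contains c) with hu
  have hsuff : u <:+ s := List.dropWhile_suffix _
  have hndu : noDD u := noDD_of_suffix s u hsuff hnd
  cases h : u with
  | nil => simp [SG_nil]
  | cons c t =>
    have hc : c ≠ '-' := by
      have hhd := dropWhile_head_not (fun c => ['-'].contains c) s c t (hu ▸ h)
      intro hcc
      rw [hcc] at hhd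
      exact absurd hhd (by decide)
    rw [SG_cons c hc]
    rw [show (if (false = true ∧ ([] : List Char) ≠ []) then (['-'] : List Char) else []) = [] from by simp]
    have hndt : noDD t := noDD_tail c t (h ▸ hndu)
    have hmain := (SG_rstr t.length t [c] le_rfl (by simp) hndt).1
    simp only [List.nil_append, List.singleton_append] at hmain ⊢
    rw [hmain]
    have hcr : c :: rstr t = rstr (c :: t) := (rstr_cons c hc t).symm
    rw [hcr, rstr_eq]
    rw [dashPred]

theorem collapse_scan (s : List Char) :
    rstripDash (lstripDash (collapseA s)) = SG s [] false := by
  fun_induction collapseA s with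
  | case1 s h ih =>
    rw [ih]
    rw [replace_eq_replF _ _ _ (by simp), replF_dd]
    exact SG_repl2 s [] false
  | case2 s h =>
    have : noDD s := (PySem.Chars.isIn_eq_false_iff _ _).mp (by simpa using h)
    exact (SG_strip s this).symm

-- ===== VERDICT (by name: the statement is the Claim_ definition above) =====
theorem odstrani_znake_spec : Claim_equal_odstrani_znake := by
  intro beseda nz hdom
  unfold Spec_odstrani_znake odstrani_znake odstrani_znake_alt
  have hdom1 : allDom (PySem.Chars.replace beseda.toList [' '] ['-']) := by
    intro c hc
    rw [replace_eq_replF _ _ _ (by simp)] at hc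
    rcases mem_replF _ _ _ _ hc with h | h
    · unfold Dom_odstrani_znake at hdom
      simp [pvDomStr, List.all_eq_true] at hdom
      exact hdom.1 c h
    · simp at h
      subst h
      decide
  have hfold := fold_eq (nz ++ [","]) _ hdom1
  rw [hfold.1]
  congr 1
  exact collapse_scan _
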